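-- pv_equiv track=rewrite | github.com/ekkamon/cs-01418112-python-lab | lab13/4.py | get_sunday_count_between_date
-- ===== SOURCE A (Python) =====
-- def get_max_day_by_month(month):
--   if month == 2:
--     return 28
--
--   return 31 if month in [1, 3, 5, 7, 8, 10, 12] else 30
--
-- def get_last_sunday(sunday, max_day):
--   for day in range(max_day, 1, -1):
--     if day % 7 == sunday % 7:
--       return day
--
-- def get_first_sunday(last_sunday, max_day):
--   return (last_sunday + 7) % max_day
--
-- def get_first_sunday_all_months(sunday):
--   data = [sunday]
--   months = [month for month in range(2, 13)]
--
--   last_sunday = get_last_sunday(sunday, 31)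
--   first_sunday = get_first_sunday(last_sunday, 31)
--
--   for month in months:
--     data.append(first_sunday)
--
--     max_day = get_max_day_by_month(month)
--     last_sunday = get_last_sunday(first_sunday, max_day)
--     first_sunday = get_first_sunday(last_sunday, max_day)
--
--   return data
--
-- def get_sunday_count_of_month(sunday, start, end):
--   return len([day for day in range(start, end + 1) if day % 7 == sunday % 7])
--
-- def get_sunday_count_between_date(sunday, start_date, end_date):
--   [start_day, start_month], [end_day, end_month] = start_date, end_date
--
--   total = 0
--   months = [month for month in range(start_month, end_month + 1)]
--   start_sunday_of_months = get_first_sunday_all_months(sunday)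
--
--   for idx in range(len(months)):
--       month = months[idx]
--       start = start_day if idx == 0 else 1
--       end = end_day if idx == (len(months) - 1) else get_max_day_by_month(month)
--       total += get_sunday_count_of_month(start_sunday_of_months[month-1], start, end)
--
--   return total
-- ===== SOURCE B (Python) =====
-- # Closed-form re-implementation: per-month Sunday residue from a cumulative-days
-- # table (A's scan walks weekdays backwards, hence the minus sign), and a
-- # constant-time arithmetic count per month instead of scanning every day.
-- _CUM = [0, 31, 59, 90, 120, 151, 181, 212, 243, 273, 304, 334]
--
-- def get_sunday_count_between_date(sunday, start_date, end_date):
--     (start_day, start_month), (end_day, end_month) = start_date, end_date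
--     last = end_month - start_month
--     total = 0
--     for idx, month in enumerate(range(start_month, end_month + 1)):
--         start = start_day if idx == 0 else 1
--         if idx == last:
--             end = end_day
--         elif month == 2:
--             end = 28
--         elif month in (1, 3, 5, 7, 8, 10, 12):
--             end = 31
--         else:
--             end = 30
--         r = (sunday - _CUM[month - 1]) % 7
--         first = start + (r - start) % 7
--         total += 0 if first > end else (end - first) // 7 + 1
--     return total
-- ===== Notes on version B (the rewrite author's own statement) =====
-- stated objective: alternative
-- what changed: Replaces A's whole chain of scans (backward weekday scan per month to build the first-Sunday list, then a per-day filter over every month's range) with a single enumerate loop that reads each month's Sunday residue from a static cumulative-days table and counts matching days with a closed-form arithmetic formula.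
-- outside the precondition, e.g. on get_sunday_count_between_date(0, [1, 1, 2], [31, 12]): A raises ValueError, B raises ValueError; on get_sunday_count_between_date(0, [1, 1], [31, 13]): A raises IndexError, B raises IndexError
import Mathlib
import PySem

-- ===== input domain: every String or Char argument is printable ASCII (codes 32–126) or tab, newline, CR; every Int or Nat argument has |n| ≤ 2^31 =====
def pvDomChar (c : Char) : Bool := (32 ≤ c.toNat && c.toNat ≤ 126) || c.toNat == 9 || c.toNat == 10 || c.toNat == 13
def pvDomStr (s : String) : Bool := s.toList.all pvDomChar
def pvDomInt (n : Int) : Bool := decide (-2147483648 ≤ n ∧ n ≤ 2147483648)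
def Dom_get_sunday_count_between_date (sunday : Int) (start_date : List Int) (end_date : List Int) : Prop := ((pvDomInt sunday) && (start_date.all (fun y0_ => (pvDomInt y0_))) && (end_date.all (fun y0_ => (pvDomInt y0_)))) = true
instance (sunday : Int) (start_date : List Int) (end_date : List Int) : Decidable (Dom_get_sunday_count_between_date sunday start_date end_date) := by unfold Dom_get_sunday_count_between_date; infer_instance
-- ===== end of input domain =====

-- B replaces A's per-day scans with a closed-form per-month count from a cumulative-days table (objective: simpler).

-- ===== PORT A =====
def get_max_day_by_month (month : Int) : Int :=
  if month == 2 then 28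
  else if [1, 3, 5, 7, 8, 10, 12].contains month then 31 else 30

-- returns none where Python's loop falls through and the function returns None
def get_last_sunday (sunday : Int) (max_day : Int) : Option Int :=
  (PySem.List.pyRange max_day 1 (-1)).find? (fun day => PySem.Int.mod day 7 == PySem.Int.mod sunday 7)

def get_first_sunday (last_sunday : Int) (max_day : Int) : Int :=
  PySem.Int.mod (last_sunday + 7) max_day

-- '.getD 0' stands for Python adding None: unreachable here, since for max_day ∈ {28,30,31}
-- the scan in get_last_sunday always finds a day (every residue mod 7 occurs in 2..28)
def get_first_sunday_all_months (sunday : Int) : List Int :=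
  let data : List Int := [sunday]
  let months := PySem.List.pyRange 2 13 1
  let last_sunday := (get_last_sunday sunday 31).getD 0
  let first_sunday := get_first_sunday last_sunday 31
  (months.foldl (fun (st : List Int × Int) month =>
      let data' := st.1 ++ [st.2]
      let max_day := get_max_day_by_month month
      let ls := (get_last_sunday st.2 max_day).getD 0
      let fs := get_first_sunday ls max_day
      (data', fs)) (data, first_sunday)).1

def get_sunday_count_of_month (sunday : Int) (start : Int) (end_ : Int) : Int :=
  (((PySem.List.pyRange start (end_ + 1) 1).filter
    (fun day => PySem.Int.mod day 7 == PySem.Int.mod sunday 7)).length : Int)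

def get_sunday_count_between_date (sunday : Int) (start_date : List Int) (end_date : List Int) : Int :=
  match start_date, end_date with
  | [start_day, start_month], [end_day, end_month] =>
    let months := PySem.List.pyRange start_month (end_month + 1) 1
    let ssm := get_first_sunday_all_months sunday
    (PySem.List.pyRange 0 (months.length : Int) 1).foldl (fun total idx =>
      let month := PySem.List.pyGetD months idx 0
      let start := if idx == 0 then start_day else 1
      let e := if idx == (months.length : Int) - 1 then end_day else get_max_day_by_month month
      total + get_sunday_count_of_month (PySem.List.pyGetD ssm (month - 1) 0) start e) 0
  | _, _ => 0  -- Python raises ValueError on unpacking; excluded by Pre_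

-- ===== PORT B =====
def pvCum : List Int := [0, 31, 59, 90, 120, 151, 181, 212, 243, 273, 304, 334]

def get_sunday_count_between_date_alt (sunday : Int) (start_date : List Int) (end_date : List Int) : Int :=
  if start_date.length == 2 && end_date.length == 2 then
    let start_day := start_date.getD 0 0
    let start_month := start_date.getD 1 0
    let end_day := end_date.getD 0 0
    let end_month := end_date.getD 1 0
    let last := end_month - start_month
    (PySem.List.enumerate (PySem.List.pyRange start_month (end_month + 1) 1) 0).foldl
      (fun total p =>
        let idx := p.1
        let month := p.2
        let start := if idx == 0 then start_day else 1
        let e := if idx == last then end_day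
                 else if month == 2 then 28
                 else if [1, 3, 5, 7, 8, 10, 12].contains month then (31 : Int) else 30
        let r := PySem.Int.mod (sunday - PySem.List.pyGetD pvCum (month - 1) 0) 7
        let first := start + PySem.Int.mod (r - start) 7
        total + (if first > e then 0 else PySem.Int.floordiv (e - first) 7 + 1)) 0
  else 0  -- Python raises ValueError on unpacking; excluded by Pre_

-- ===== PRECONDITION & SPEC =====
-- Pre_ excludes exactly the inputs where Python A raises: lists not of length 2 (ValueError on
-- unpacking) and month ranges reaching outside [-11, 12] (IndexError on data[month-1], len 12).
def Pre_get_sunday_count_between_date (sunday : Int) (start_date : List Int) (end_date : List Int) : Prop :=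
  start_date.length = 2 ∧ end_date.length = 2 ∧
  (start_date.getD 1 0 ≤ end_date.getD 1 0 → -11 ≤ start_date.getD 1 0 ∧ end_date.getD 1 0 ≤ 12)

instance (sunday : Int) (start_date : List Int) (end_date : List Int) : Decidable (Pre_get_sunday_count_between_date sunday start_date end_date) := by
  unfold Pre_get_sunday_count_between_date; infer_instance

def pvWitness_get_sunday_count_between_date : Int × List Int × List Int := (0, [1, 1], [31, 12])

def Spec_get_sunday_count_between_date (sunday : Int) (start_date : List Int) (end_date : List Int) (out : Int) : Prop := out = get_sunday_count_between_date_alt sunday start_date end_date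
instance (sunday : Int) (start_date : List Int) (end_date : List Int) (out : Int) : Decidable (Spec_get_sunday_count_between_date sunday start_date end_date out) := by unfold Spec_get_sunday_count_between_date; infer_instance

-- ===== CLAIM (what is proved, stated in full; the proofs are below) =====
def Claim_equal_get_sunday_count_between_date : Prop := ∀ (sunday : Int) (start_date : List Int) (end_date : List Int), Dom_get_sunday_count_between_date sunday start_date end_date → Pre_get_sunday_count_between_date sunday start_date end_date → Spec_get_sunday_count_between_date sunday start_date end_date (get_sunday_count_between_date sunday start_date end_date)

-- ===== LEMMAS AND PROOFS =====

theorem pv_mod7 (x : Int) : PySem.Int.mod x 7 = x % 7 :=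
  PySem.Int.mod_eq_emod_of_pos (by norm_num)

theorem pv_div7 (x : Int) : PySem.Int.floordiv x 7 = x / 7 :=
  PySem.Int.floordiv_eq_ediv_of_pos (by norm_num)

-- closed-form count of {day ∈ [s, e] : day ≡ a (mod 7)}
theorem count_aux (a s : Int) (n : Nat) : ∀ e : Int, e + 1 - s ≤ n →
    (((PySem.List.pyRange s (e + 1) 1).filter
        (fun day => PySem.Int.mod day 7 == PySem.Int.mod a 7)).length : Int)
      = if s + (a - s) % 7 > e then 0 else (e - (s + (a - s) % 7)) / 7 + 1 := by
  induction n with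
  | zero =>
    intro e he
    rw [PySem.List.pyRange_one_eq_nil (by omega)]
    simp only [List.filter_nil, List.length_nil, Nat.cast_zero]
    rw [if_pos (by omega)]
  | succ n ih =>
    intro e he
    by_cases hs : e < s
    · rw [PySem.List.pyRange_one_eq_nil (by omega)]
      simp only [List.filter_nil, List.length_nil, Nat.cast_zero]
      rw [if_pos (by omega)]
    · rw [Int.not_lt] at hs
      rw [PySem.List.pyRange_one_succ_right hs, List.filter_append]
      have ih' := ih (e - 1) (by omega)
      rw [show e - 1 + 1 = e by ring] at ih'
      simp only [List.length_append, List.filter_cons, List.filter_nil]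
      push_cast
      rw [ih']
      simp only [pv_mod7, beq_iff_eq]
      by_cases hmod : e % 7 = a % 7 <;> simp [hmod] <;> split_ifs <;> omega

theorem count_closed (a s e : Int) :
    get_sunday_count_of_month a s e =
      (if s + (a - s) % 7 > e then 0 else (e - (s + (a - s) % 7)) / 7 + 1) := by
  unfold get_sunday_count_of_month
  exact count_aux a s (e + 1 - s).toNat e (by omega)

-- the data list in A: a symbolic head, and a tail depending only on sunday % 7
theorem foldl_trace {α β : Type} (l : List α) (g : β → α → β) (d0 : List β) (f0 : β) :
    (l.foldl (fun st m => (st.1 ++ [st.2], g st.2 m)) (d0, f0)).1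
      = d0 ++ (l.foldl (fun st m => (st.1 ++ [st.2], g st.2 m)) ([], f0)).1 := by
  induction l generalizing d0 f0 with
  | nil => simp
  | cons m l ih =>
    simp only [List.foldl_cons, List.nil_append]
    rw [ih (d0 ++ [f0]), ih [f0], List.append_assoc]

theorem mod7_idem (x : Int) : PySem.Int.mod (PySem.Int.mod x 7) 7 = PySem.Int.mod x 7 := by
  simp only [pv_mod7]; omega

theorem last_sunday_mod (s m : Int) :
    get_last_sunday (PySem.Int.mod s 7) m = get_last_sunday s m := by
  unfold get_last_sunday
  simp only [mod7_idem]

theorem ssm_head_tail (s : Int) :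
    get_first_sunday_all_months s
      = s :: (get_first_sunday_all_months (PySem.Int.mod s 7)).tail := by
  unfold get_first_sunday_all_months
  simp only [last_sunday_mod]
  rw [foldl_trace (g := fun fs month =>
        get_first_sunday ((get_last_sunday fs (get_max_day_by_month month)).getD 0)
          (get_max_day_by_month month)),
      foldl_trace (g := fun fs month =>
        get_first_sunday ((get_last_sunday fs (get_max_day_by_month month)).getD 0)
          (get_max_day_by_month month)),
      foldl_trace (g := fun fs month =>
        get_first_sunday ((get_last_sunday fs (get_max_day_by_month month)).getD 0)
          (get_max_day_by_month month)) (d0 := [PySem.Int.mod s 7])]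
  simp

-- residues of A's data list agree with B's cumulative-days table
set_option maxHeartbeats 1000000 in
theorem residue_eq (s j : Int) (h1 : -12 ≤ j) (h2 : j ≤ 11) :
    PySem.Int.mod (PySem.List.pyGetD (get_first_sunday_all_months s) j 0) 7
      = PySem.Int.mod (s - PySem.List.pyGetD pvCum j 0) 7 := by
  rw [ssm_head_tail s, pv_mod7 s]
  simp only [pv_mod7]
  have hr : s % 7 = 0 ∨ s % 7 = 1 ∨ s % 7 = 2 ∨ s % 7 = 3 ∨ s % 7 = 4 ∨ s % 7 = 5 ∨ s % 7 = 6 := by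
    omega
  rcases hr with h|h|h|h|h|h|h <;> rw [h]
  · rw [show (get_first_sunday_all_months 0).tail = [4, 4, 1, 6, 3, 1, 5, 2, 7, 4, 2] by decide]
    interval_cases j <;>
      simp [PySem.List.pyGetD, PySem.List.pyGet?, PySem.List.pyIdx?, pvCum] <;>
      omega
  · rw [show (get_first_sunday_all_months 1).tail = [5, 5, 2, 7, 4, 2, 6, 3, 1, 5, 3] by decide]
    interval_cases j <;>
      simp [PySem.List.pyGetD, PySem.List.pyGet?, PySem.List.pyIdx?, pvCum] <;>
      omega
  · rw [show (get_first_sunday_all_months 2).tail = [6, 6, 3, 1, 5, 3, 7, 4, 2, 6, 4] by decide]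
    interval_cases j <;>
      simp [PySem.List.pyGetD, PySem.List.pyGet?, PySem.List.pyIdx?, pvCum] <;>
      omega
  · rw [show (get_first_sunday_all_months 3).tail = [7, 7, 4, 2, 6, 4, 1, 5, 3, 7, 5] by decide]
    interval_cases j <;>
      simp [PySem.List.pyGetD, PySem.List.pyGet?, PySem.List.pyIdx?, pvCum] <;>
      omega
  · rw [show (get_first_sunday_all_months 4).tail = [1, 1, 5, 3, 7, 5, 2, 6, 4, 1, 6] by decide]
    interval_cases j <;>
      simp [PySem.List.pyGetD, PySem.List.pyGet?, PySem.List.pyIdx?, pvCum] <;>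
      omega
  · rw [show (get_first_sunday_all_months 5).tail = [2, 2, 6, 4, 1, 6, 3, 7, 5, 2, 7] by decide]
    interval_cases j <;>
      simp [PySem.List.pyGetD, PySem.List.pyGet?, PySem.List.pyIdx?, pvCum] <;>
      omega
  · rw [show (get_first_sunday_all_months 6).tail = [3, 3, 7, 5, 2, 7, 4, 1, 6, 3, 1] by decide]
    interval_cases j <;>
      simp [PySem.List.pyGetD, PySem.List.pyGet?, PySem.List.pyIdx?, pvCum] <;>
      omega

-- ===== VERDICT (by name: the statement is the Claim_ definition above) =====
theorem get_sunday_count_between_date_spec : Claim_equal_get_sunday_count_between_date := by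
  intro sunday start_date end_date hdom hpre
  obtain ⟨h1, h2, h3⟩ := hpre
  obtain ⟨sd, sm, rfl⟩ := List.length_eq_two.mp h1
  obtain ⟨ed, em, rfl⟩ := List.length_eq_two.mp h2
  simp only [List.getD, List.getElem?_cons_succ, List.getElem?_cons_zero, Option.getD_some] at h3
  unfold Spec_get_sunday_count_between_date
  unfold get_sunday_count_between_date get_sunday_count_between_date_alt
  simp only [List.getD, List.getElem?_cons_succ, List.getElem?_cons_zero, Option.getD_some,
    List.length_cons, List.length_nil, Nat.reduceAdd, beq_self_eq_true, Bool.and_self, if_true]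
  rw [PySem.List.enumerate_eq_map_pyRange (d := 0), List.foldl_map, PySem.List.len_eq]
  apply PySem.List.foldl_congr_mem
  intro acc idx hidx
  simp only []
  rw [PySem.List.mem_pyRange_one] at hidx
  rw [PySem.List.length_pyRange_one] at hidx ⊢
  -- the range is nonempty, so sm ≤ em and the month bounds from Pre_ apply
  have hn : sm ≤ em := by omega
  obtain ⟨hlo, hhi⟩ := h3 hn
  have hinr : PySem.Raise.InRange (PySem.List.pyRange sm (em + 1) 1).length idx := by
    rw [PySem.List.length_pyRange_one]
    constructor <;> omega
  have hmem := PySem.List.pyGetD_mem (xs := PySem.List.pyRange sm (em + 1) 1) (i := idx) (d := 0) hinr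
  rw [PySem.List.mem_pyRange_one] at hmem
  set month := PySem.List.pyGetD (PySem.List.pyRange sm (em + 1) 1) idx 0 with hmdef
  have hlen : ((((em + 1 - sm).toNat) : Int) - 1) = em - sm := by omega
  rw [hlen]
  have hres := residue_eq sunday (month - 1) (by omega) (by omega)
  rw [count_closed]
  unfold get_max_day_by_month
  rw [pv_mod7, pv_mod7] at hres
  simp only [pv_mod7, pv_div7]
  congr 1
  split_ifs <;> omega
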